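-- pv_equiv track=rewrite | github.com/NoelKi/satlink-threatguard | src/library.py | calculate_overlaps_for_each_interval
-- ===== SOURCE A (Python) =====
-- def calculate_overlaps_for_each_interval(intervals_a, intervals_b):
--     """
--     This function calculates the if the b lists of tuple have an overalps with the a list tuples.
--
--     :param intervals_a: list of tuple with (start,end) of interval
--     :param intervals_b: list of tuple with (start,end) of interval
--     :return all_overlaps: list of [(periodnumber, (overlapstart,overlapend),...),...]
--     """
--     all_overlaps = []
--
--     for index, (start_a, end_a) in enumerate(intervals_a):
--         interval_overlaps = []
--         for start_b, end_b in intervals_b: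
--             overlap_start = max(start_a, start_b)
--             overlap_end = min(end_a, end_b)
--             if overlap_start < overlap_end:
--                 interval_overlaps.append((overlap_start, overlap_end))
--         all_overlaps.append((index, interval_overlaps))
--
--     return all_overlaps
-- ===== SOURCE B (Python) =====
-- def _bucket(sa, ea, bs):
--     """Overlaps of (sa, ea) with the start-sorted indexed b intervals bs,
--     stopping at the first start >= ea; original b order restored by index."""
--     hits = []
--     if sa < ea:
--         for sb, eb, j in bs:
--             if sb >= ea:
--                 break
--             if sa < eb:
--                 hits.append((j, (max(sa, sb), min(ea, eb))))
--         hits.sort(key=lambda t: t[0])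
--     return [ov for _, ov in hits]
--
--
-- def calculate_overlaps_for_each_interval(intervals_a, intervals_b):
--     """Sort-based overlap join: index and drop degenerate b intervals, sort them
--     by start, scan with early termination per a interval, restore order by index."""
--     bs = sorted([(sb, eb, j) for j, (sb, eb) in enumerate(intervals_b) if sb < eb],
--                 key=lambda t: t[0])
--     return [(i, _bucket(sa, ea, bs)) for i, (sa, ea) in enumerate(intervals_a)]
-- ===== Notes on version B (the rewrite author's own statement) =====
-- stated objective: faster
-- what changed: B replaces A's full n*m pairwise scan with a sort-based join: b intervals are indexed, degenerate ones dropped, sorted by start once; each a interval scans the sorted list with early termination at the first start >= end_a, and the hits are re-sorted by original b index to restore A's inner-list order.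
import Mathlib
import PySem

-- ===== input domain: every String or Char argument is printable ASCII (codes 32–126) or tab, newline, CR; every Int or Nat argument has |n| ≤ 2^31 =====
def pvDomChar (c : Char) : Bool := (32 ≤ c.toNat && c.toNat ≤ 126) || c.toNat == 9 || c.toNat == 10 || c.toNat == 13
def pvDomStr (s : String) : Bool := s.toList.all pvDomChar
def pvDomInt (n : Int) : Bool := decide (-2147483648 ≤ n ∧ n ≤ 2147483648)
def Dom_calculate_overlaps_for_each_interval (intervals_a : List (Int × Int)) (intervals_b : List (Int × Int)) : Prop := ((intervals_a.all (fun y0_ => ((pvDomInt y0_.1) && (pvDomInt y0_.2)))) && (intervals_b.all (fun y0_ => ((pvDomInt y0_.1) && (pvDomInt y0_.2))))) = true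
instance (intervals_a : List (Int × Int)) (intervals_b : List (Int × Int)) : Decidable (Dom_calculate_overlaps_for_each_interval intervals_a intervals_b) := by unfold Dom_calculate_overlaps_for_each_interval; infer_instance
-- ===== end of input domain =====

-- B replaces A's full pairwise scan by a sort-based join (index+sort b by start, scan with early cutoff per a, re-sort hits by b index); same results, proved equal.


-- ===== PORT A =====
-- literal port: outer loop over enumerate(intervals_a) appends finished rows,
-- inner loop over intervals_b appends overlaps via max/min
def calculate_overlaps_for_each_interval (intervals_a : List (Int × Int)) (intervals_b : List (Int × Int)) : List (Int × (List (Int × Int))) :=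
  (PySem.List.enumerate intervals_a 0).foldl
    (fun all_overlaps p =>
      all_overlaps ++ [(p.1,
        intervals_b.foldl (fun interval_overlaps q =>
          let overlap_start := max p.2.1 q.1
          let overlap_end := min p.2.2 q.2
          if overlap_start < overlap_end then interval_overlaps ++ [(overlap_start, overlap_end)]
          else interval_overlaps) [])]) []

-- ===== PORT B =====
-- the for-loop over bs with `break` at the first start >= ea (Source B's _bucket loop)
def pvScanB (sa ea : Int) : List (Int × Int × Int) → List (Int × (Int × Int))
  | [] => []
  | (sb, eb, j) :: rest =>
      if sb ≥ ea then []
      else if sa < eb then (j, (max sa sb, min ea eb)) :: pvScanB sa ea rest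
      else pvScanB sa ea rest

-- Source B's _bucket: scan the start-sorted bs (early break), re-sort hits by index, drop indices
def pvBucket (sa ea : Int) (bs : List (Int × Int × Int)) : List (Int × Int) :=
  (if sa < ea then PySem.List.sorted (pvScanB sa ea bs) (fun t => t.1) else []).map (fun t => t.2)

-- Source B's `bs`: indexed non-degenerate b intervals, sorted by start
def pvBs (intervals_b : List (Int × Int)) : List (Int × Int × Int) :=
  PySem.List.sorted
    ((PySem.List.enumerate intervals_b 0).filterMap
      (fun p => if p.2.1 < p.2.2 then some (p.2.1, p.2.2, p.1) else none))
    (fun t => t.1)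

-- literal port of Source B's comprehension over enumerate(intervals_a)
def calculate_overlaps_for_each_interval_alt (intervals_a : List (Int × Int)) (intervals_b : List (Int × Int)) : List (Int × (List (Int × Int))) :=
  (PySem.List.enumerate intervals_a 0).map (fun p => (p.1, pvBucket p.2.1 p.2.2 (pvBs intervals_b)))

-- ===== PRECONDITION & SPEC =====
def Spec_calculate_overlaps_for_each_interval (intervals_a : List (Int × Int)) (intervals_b : List (Int × Int)) (out : List (Int × (List (Int × Int)))) : Prop := out = calculate_overlaps_for_each_interval_alt intervals_a intervals_b
instance (intervals_a : List (Int × Int)) (intervals_b : List (Int × Int)) (out : List (Int × (List (Int × Int)))) : Decidable (Spec_calculate_overlaps_for_each_interval intervals_a intervals_b out) := by unfold Spec_calculate_overlaps_for_each_interval; infer_instance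

-- ===== CLAIM =====
def Claim_equal_calculate_overlaps_for_each_interval : Prop := ∀ (intervals_a : List (Int × Int)) (intervals_b : List (Int × Int)), Dom_calculate_overlaps_for_each_interval intervals_a intervals_b → Spec_calculate_overlaps_for_each_interval intervals_a intervals_b (calculate_overlaps_for_each_interval intervals_a intervals_b)

-- ===== LEMMAS AND PROOFS =====

-- the combined hit function on an indexed b interval
def pvG (sa ea : Int) (t : Int × Int × Int) : Option (Int × (Int × Int)) :=
  if t.1 < ea ∧ sa < t.2.1 then some (t.2.2, (max sa t.1, min ea t.2.1)) else none

-- Source B's indexing function, named for the proofs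
def pvF0 (p : Int × (Int × Int)) : Option (Int × Int × Int) :=
  if p.2.1 < p.2.2 then some (p.2.1, p.2.2, p.1) else none

lemma filterMap_ite {α β : Type} (p : α → Prop) [DecidablePred p] (f : α → β) :
    ∀ (xs : List α), xs.filterMap (fun x => if p x then some (f x) else none)
      = (xs.filter (fun x => decide (p x))).map f := by
  intro xs; induction xs with
  | nil => rfl
  | cons x xs ih => by_cases h : p x <;> simp [h, ih]

-- the break loop on a start-sorted list is a filterMap
lemma scan_eq_filterMap (sa ea : Int) :
    ∀ (l : List (Int × Int × Int)), l.Pairwise (fun a b => a.1 ≤ b.1) →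
      pvScanB sa ea l = l.filterMap (pvG sa ea) := by
  intro l
  induction l with
  | nil => intro _; rfl
  | cons t rest ih =>
      intro hp
      obtain ⟨sb, eb, j⟩ := t
      rw [List.pairwise_cons] at hp
      by_cases h1 : sb ≥ ea
      · have hall : ∀ x ∈ (sb, eb, j) :: rest, pvG sa ea x = none := by
          intro x hx
          rcases List.mem_cons.mp hx with rfl | hx
          · simp [pvG]; omega
          · have := hp.1 x hx
            simp [pvG]; omega
        rw [List.filterMap_eq_nil_iff.mpr hall]
        simp [pvScanB, h1]
      · by_cases h2 : sa < eb
        · have hg : pvG sa ea (sb, eb, j) = some (j, (max sa sb, min ea eb)) := by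
            simp only [pvG, if_pos (show sb < ea ∧ sa < eb by omega)]
          simp only [pvScanB, if_neg h1, if_pos h2, List.filterMap_cons, hg, ih hp.2]
        · have hg : pvG sa ea (sb, eb, j) = none := by
            simp [pvG]; omega
          simp only [pvScanB, if_neg h1, if_neg h2, List.filterMap_cons, hg, ih hp.2]

-- filterMap over enumerate with an index-ignoring function is a filterMap over the list
lemma filterMap_enumerate_snd {α β : Type} (h : α → Option β) :
    ∀ (xs : List α) (s : Int),
      (PySem.List.enumerate xs s).filterMap (fun p => h p.2) = xs.filterMap h := by
  intro xs
  induction xs with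
  | nil => intro s; simp [PySem.List.enumerate_nil]
  | cons x xs ih =>
      intro s
      cases hhx : h x <;> simp [PySem.List.enumerate_cons, hhx, ih]

-- any hit produced from an indexed b interval keeps its index as first component
lemma fst_of_bind (sa ea : Int) (t : Int × (Int × Int)) (b : Int × (Int × Int)) :
    (pvF0 t).bind (pvG sa ea) = some b → b.1 = t.1 := by
  intro h
  simp only [pvF0] at h
  split_ifs at h with h1
  · rw [show (some (t.2.1, t.2.2, t.1)).bind (pvG sa ea) = pvG sa ea (t.2.1, t.2.2, t.1) from rfl] at h
    simp only [pvG] at h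
    split_ifs at h with h2
    obtain rfl := Option.some.inj h; rfl
  · exact absurd h (by simp)

-- per-a-interval: B's bucket on the sorted indexed list equals A's inner loop
lemma bucket_eq (sa ea : Int) (ib : List (Int × Int)) :
    pvBucket sa ea (pvBs ib)
    = ib.foldl (fun acc q =>
        let overlap_start := max sa q.1
        let overlap_end := min ea q.2
        if overlap_start < overlap_end then acc ++ [(overlap_start, overlap_end)] else acc) [] := by
  have hA := PySem.List.foldl_append_if (fun q : Int × Int => decide (max sa q.1 < min ea q.2))
    (fun q : Int × Int => (max sa q.1, min ea q.2)) ib ([] : List (Int × Int))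
  simp only [decide_eq_true_eq, List.nil_append] at hA
  refine Eq.trans ?_ hA.symm
  set E := (PySem.List.enumerate ib 0).filterMap pvF0 with hE
  have hBs : pvBs ib = PySem.List.sorted E (fun t => t.1) := by
    simp only [pvBs, hE, pvF0]
  by_cases hsa : sa < ea
  · have hscan : pvScanB sa ea (PySem.List.sorted E (fun t => t.1))
        = (PySem.List.sorted E (fun t => t.1)).filterMap (pvG sa ea) :=
      scan_eq_filterMap sa ea _ (PySem.List.sorted_pairwise E (fun t => t.1))
    have hperm : ((PySem.List.sorted E (fun t => t.1)).filterMap (pvG sa ea)).Perm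
        (E.filterMap (pvG sa ea)) :=
      (PySem.List.sorted_perm E (fun t => t.1) false).filterMap _
    have hpw : (E.filterMap (pvG sa ea)).Pairwise (fun a b => a.1 < b.1) := by
      rw [hE, List.filterMap_filterMap, List.pairwise_filterMap]
      apply List.Pairwise.imp _ (PySem.List.pairwise_lt_enumerate ib 0)
      intro p q hpq b hb b' hb'
      rw [fst_of_bind sa ea p b hb, fst_of_bind sa ea q b' hb']
      exact hpq
    have hsorted : PySem.List.sorted ((PySem.List.sorted E (fun t => t.1)).filterMap (pvG sa ea)) (fun t => t.1)
        = E.filterMap (pvG sa ea) :=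
      PySem.List.sorted_eq_of_perm_of_pairwise_lt _ _ _ hperm.symm hpw
    have hstart : pvBucket sa ea (pvBs ib) = (E.filterMap (pvG sa ea)).map (fun t => t.2) := by
      rw [hBs]; simp only [pvBucket, if_pos hsa, hscan, hsorted]
    rw [hstart, hE, List.filterMap_filterMap, List.map_filterMap]
    have hfun : (fun p : Int × (Int × Int) =>
          Option.map (fun t : Int × (Int × Int) => t.2) ((pvF0 p).bind (pvG sa ea)))
        = fun p : Int × (Int × Int) =>
            (fun q : Int × Int => if max sa q.1 < min ea q.2 then some (max sa q.1, min ea q.2) else none) p.2 := by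
      funext p
      by_cases c1 : p.2.1 < p.2.2
      · by_cases c2 : p.2.1 < ea ∧ sa < p.2.2
        · have c3 : max sa p.2.1 < min ea p.2.2 := by omega
          simp [pvF0, pvG, c1, c2, c3]
        · have c3 : ¬ max sa p.2.1 < min ea p.2.2 := by omega
          simp [pvF0, pvG, c1, c2, c3]
      · have c3 : ¬ max sa p.2.1 < min ea p.2.2 := by omega
        simp [pvF0, pvG, c1, c3]
    rw [hfun]
    exact (filterMap_enumerate_snd
        (fun q : Int × Int => if max sa q.1 < min ea q.2 then some (max sa q.1, min ea q.2) else none) ib 0).trans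
      (filterMap_ite (fun q : Int × Int => max sa q.1 < min ea q.2) (fun q => (max sa q.1, min ea q.2)) ib)
  · have hnil : ib.filter (fun q : Int × Int => decide (max sa q.1 < min ea q.2)) = [] := by
      rw [List.filter_eq_nil_iff]
      intro q _; simp; omega
    rw [hnil]
    simp [pvBucket, hsa]

-- ===== VERDICT =====
theorem calculate_overlaps_for_each_interval_spec : Claim_equal_calculate_overlaps_for_each_interval := by
  intro ia ib _
  show _ = calculate_overlaps_for_each_interval_alt ia ib
  unfold calculate_overlaps_for_each_interval calculate_overlaps_for_each_interval_alt
  rw [PySem.List.foldl_append_singleton_eq_map]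
  apply List.map_congr_left
  intro p _
  rw [bucket_eq p.2.1 p.2.2 ib]
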